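-- pv_equiv track=rewrite | github.com/chuoer47/AlgorithmLearning | 刷题记录/LeetCode/周赛/第477场周赛/3757. 有效子序列的数量.py | countEffective
-- ===== SOURCE A (Python) =====
-- from functools import reduce
-- from typing import List
--
-- mod = 10**9 + 7
--
-- def countEffective(nums: List[int]) -> int:
--     if all(x == nums[0] for x in nums):
--         return 1
--
--     orn = reduce(lambda x, y: x | y, nums)
--     n = orn.bit_length()
--     u = 1 << n
--
--     def eq(orn):
--         # 返回或等于orn的子序列数量
--
--         dp = [0] * u  # dp[x]表示x子集的数目
--         for x in nums:
--             dp[x] += 1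
--
--         for i in range(n):
--             bit = 1 << i
--             if orn & bit == 0:
--                 continue
--             for x in range(u):
--                 if x & bit == 0:
--                     continue
--                 dp[x] += dp[x ^ bit]
--         ans = 0
--         sub = orn
--         while True:
--             tmp = pow(2, dp[sub], mod)
--             cnt = (orn ^ sub).bit_count()
--             sign = 1 if cnt % 2 == 0 else -1
--             ans = (ans + sign * tmp) % mod
--             if sub == 0:
--                 break
--             sub = (sub - 1) & orn
--         return ans
--
--     all_sub = pow(2, len(nums), mod)  # 所有子序列的个数
--     invalid = eq(orn)
--
--     return (all_sub - invalid) % mod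
-- ===== SOURCE B (Python) =====
-- mod = 10**9 + 7
--
-- def countEffective(nums):
--     if all(x == nums[0] for x in nums):
--         return 1
--
--     orn = 0
--     for x in nums:
--         orn |= x
--
--     # inclusion-exclusion over the submasks of orn, counting the numbers
--     # contained in each submask by a direct scan (no 2^bit_length table)
--     ans = 0
--     sub = orn
--     while True:
--         c = 0
--         for x in nums:
--             if x | sub == sub:
--                 c += 1
--         if (orn ^ sub).bit_count() % 2 == 0:
--             ans = (ans + pow(2, c, mod)) % mod
--         else:
--             ans = (ans - pow(2, c, mod)) % mod
--         if sub == 0: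
--             break
--         sub = (sub - 1) & orn
--
--     return (pow(2, len(nums), mod) - ans) % mod
-- ===== Notes on version B (the rewrite author's own statement) =====
-- stated objective: alternative
-- what changed: B drops A's size-2^bit_length(OR) frequency table and its sum-over-subsets (zeta) transform entirely: during the inclusion-exclusion walk over the submasks of the total OR it counts the numbers contained in each submask by a direct scan of nums, so the cost is O(2^popcount(OR)*len(nums)) with O(1) extra space instead of A's O(2^bit_length(OR)*bit_length(OR)) time and table space.
import Mathlib
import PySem

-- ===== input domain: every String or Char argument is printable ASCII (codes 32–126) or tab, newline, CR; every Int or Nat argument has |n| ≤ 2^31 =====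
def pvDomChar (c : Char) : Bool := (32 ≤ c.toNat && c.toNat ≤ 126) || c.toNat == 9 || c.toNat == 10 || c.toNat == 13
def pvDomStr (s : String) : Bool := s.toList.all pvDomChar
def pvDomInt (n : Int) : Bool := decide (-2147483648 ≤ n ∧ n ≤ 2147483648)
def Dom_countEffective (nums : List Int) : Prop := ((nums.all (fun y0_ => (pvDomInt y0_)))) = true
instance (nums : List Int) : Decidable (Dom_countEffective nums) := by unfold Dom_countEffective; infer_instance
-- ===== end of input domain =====

-- B replaces A's size-2^bit_length sum-over-subsets (zeta-transform) table by a direct scan of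
-- nums for each submask of the total OR during the inclusion-exclusion walk (objective: alternative).

-- ===== PORT A =====
-- Under Pre_ every value that reaches the else-branch is nonnegative, so indices/masks are kept as Nat
-- (exact there; Python's dp list indexing, '&', '^', '<<' on nonnegative ints coincide with Nat's).

-- 'dp = [0]*u; for x in nums: dp[x] += 1'  (dp as an Array so evaluation is array-like, as in Python)
def aCounts (nums : List Int) (u : Nat) : Array Nat :=
  nums.foldl (fun dp x => dp.setIfInBounds x.toNat (dp.getD x.toNat 0 + 1)) (Array.replicate u 0)

-- 'for i in range(n): ... for x in range(u): if x & bit: dp[x] += dp[x ^ bit]'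
def aPass (orn u : Nat) (dp : Array Nat) (i : Nat) : Array Nat :=
  let bit := 1 <<< i
  if orn &&& bit == 0 then dp
  else (List.range u).foldl (fun dp x =>
    if x &&& bit == 0 then dp
    else dp.setIfInBounds x (dp.getD x 0 + dp.getD (x ^^^ bit) 0)) dp

def aSos (orn n u : Nat) (dp : Array Nat) : Array Nat :=
  (List.range n).foldl (aPass orn u) dp

-- the 'while True' submask walk; terminates because (sub-1) &&& orn < sub for sub ≠ 0
def aLoop (orn : Nat) (dp : Array Nat) (sub : Nat) (ans : Int) : Int :=
  let tmp : Int := PySem.Int.powMod 2 (dp.getD sub 0) 1000000007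
  let cnt : Nat := PySem.Int.bitCount ((orn ^^^ sub : Nat) : Int)
  let sign : Int := if cnt % 2 == 0 then 1 else -1
  let ans' := PySem.Int.mod (ans + sign * tmp) 1000000007
  if h : sub = 0 then ans'
  else aLoop orn dp ((sub - 1) &&& orn) ans'
  termination_by sub
  decreasing_by exact Nat.lt_of_le_of_lt Nat.and_le_left (by omega)

def countEffective (nums : List Int) : Int :=
  if nums.all (fun x => x == nums.headD 0) then 1
  else
    let orn : Int := nums.tail.foldl (fun a b => PySem.Int.bor a b) (nums.headD 0)
    let n := PySem.Int.bitLength orn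
    let u := 1 <<< n
    let dp := aSos orn.toNat n u (aCounts nums u)
    let invalid := aLoop orn.toNat dp orn.toNat 0
    let allSub := PySem.Int.powMod 2 nums.length 1000000007
    PySem.Int.mod (allSub - invalid) 1000000007

-- ===== PORT B =====
-- 'c = 0; for x in nums: if x | sub == sub: c += 1'
def bCount (nums : List Int) (sub : Nat) : Nat :=
  nums.foldl (fun c x => if PySem.Int.bor x (sub : Int) == (sub : Int) then c + 1 else c) 0

-- B's submask walk: inclusion-exclusion term from a direct scan of nums
def bLoop (nums : List Int) (orn : Nat) (sub : Nat) (ans : Int) : Int :=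
  let tmp : Int := PySem.Int.powMod 2 (bCount nums sub) 1000000007
  let ans' :=
    if PySem.Int.bitCount ((orn ^^^ sub : Nat) : Int) % 2 == 0
    then PySem.Int.mod (ans + tmp) 1000000007
    else PySem.Int.mod (ans - tmp) 1000000007
  if h : sub = 0 then ans'
  else bLoop nums orn ((sub - 1) &&& orn) ans'
  termination_by sub
  decreasing_by exact Nat.lt_of_le_of_lt Nat.and_le_left (by omega)

def countEffective_alt (nums : List Int) : Int :=
  if nums.all (fun x => x == nums.headD 0) then 1
  else
    let orn : Int := nums.foldl (fun a b => PySem.Int.bor a b) 0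
    let ans := bLoop nums orn.toNat orn.toNat 0
    PySem.Int.mod (PySem.Int.powMod 2 nums.length 1000000007 - ans) 1000000007

-- ===== PRECONDITION & SPEC =====
-- Pre_ excludes exactly the inputs on which A raises IndexError: a negative element together with
-- not-all-equal elements makes orn negative, and the submask walk then indexes dp out of range.
def Pre_countEffective (nums : List Int) : Prop :=
  (∀ x ∈ nums, 0 ≤ x) ∨ (∀ x ∈ nums, x = nums.headD 0)
instance (nums : List Int) : Decidable (Pre_countEffective nums) := by
  unfold Pre_countEffective; infer_instance

def pvWitness_countEffective : List Int := [1, 2, 3]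

def Spec_countEffective (nums : List Int) (out : Int) : Prop := out = countEffective_alt nums
instance (nums : List Int) (out : Int) : Decidable (Spec_countEffective nums out) := by
  unfold Spec_countEffective; infer_instance

-- ===== CLAIM (what is proved, stated in full; the proofs are below) =====
def Claim_equal_countEffective : Prop :=
  ∀ (nums : List Int), Dom_countEffective nums → Pre_countEffective nums →
    Spec_countEffective nums (countEffective nums)

-- ===== LEMMAS AND PROOFS =====

-- ---------- generic list-array helpers ----------

theorem getD_set_eq_if (l : List Nat) (a v b : Nat) (ha : a < l.length) :
    (l.set a b).getD v 0 = if v = a then b else l.getD v 0 := by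
  rw [List.getD_eq_getElem?_getD, List.getD_eq_getElem?_getD, List.getElem?_set]
  rcases eq_or_ne v a with rfl | h
  · simp [ha]
  · simp [h, Ne.symm h]

theorem countP_split {α : Type} (l : List α) (p q : α → Bool) :
    l.countP p = l.countP (fun y => p y && q y) + l.countP (fun y => p y && !q y) := by
  induction l with
  | nil => simp
  | cons x t ih =>
      simp only [List.countP_cons, ih]
      cases hp : p x <;> cases hq : q x <;> simp <;> omega

-- ---------- bit helpers ----------

theorem and_two_pow_beq_zero (x j : Nat) :
    (x &&& 1 <<< j == 0) = !x.testBit j := by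
  rw [Nat.one_shiftLeft, Nat.and_two_pow]
  cases h : x.testBit j <;> simp

theorem testBit_ge_false (v n i : Nat) (hv : v < 2 ^ n) (hi : n ≤ i) : v.testBit i = false :=
  Nat.testBit_lt_two_pow (lt_of_lt_of_le hv (Nat.pow_le_pow_right (by norm_num) hi))

theorem xor_two_pow_lt (v n j : Nat) (hv : v < 2 ^ n) (hj : j < n) : v ^^^ 2 ^ j < 2 ^ n := by
  apply Nat.lt_pow_two_of_testBit
  intro i hi
  rw [Nat.testBit_xor, testBit_ge_false v n i hv hi, Nat.testBit_two_pow]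
  simp
  omega

-- ---------- proof-side List mirrors of the Array-typed helpers of port A ----------

theorem arr_getD (a : Array Nat) (i d : Nat) : a.getD i d = a.toList.getD i d := by
  rcases a with ⟨l⟩
  simp only [Array.getD, List.getD_eq_getElem?_getD]
  split
  · next h => simp [List.getElem?_eq_getElem (by simpa using h)]
  · next h =>
      rw [List.getElem?_eq_none (by simpa using h)]
      rfl

def aCountsL (nums : List Int) (u : Nat) : List Nat :=
  nums.foldl (fun dp x => dp.set x.toNat (dp.getD x.toNat 0 + 1)) (List.replicate u 0)

def aPassL (orn u : Nat) (dp : List Nat) (i : Nat) : List Nat :=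
  let bit := 1 <<< i
  if orn &&& bit == 0 then dp
  else (List.range u).foldl (fun dp x =>
    if x &&& bit == 0 then dp
    else dp.set x (dp.getD x 0 + dp.getD (x ^^^ bit) 0)) dp

theorem toList_aCounts (nums : List Int) (u : Nat) :
    (aCounts nums u).toList = aCountsL nums u := by
  rw [aCounts, aCountsL, ← Array.toList_replicate (n := u) (a := 0)]
  exact (List.foldl_hom Array.toList (fun dp x => by
    rw [Array.toList_setIfInBounds, arr_getD])).symm

theorem toList_aPass (orn u : Nat) (dp : Array Nat) (i : Nat) :
    (aPass orn u dp i).toList = aPassL orn u dp.toList i := by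
  rw [aPass, aPassL]
  cases hg : (orn &&& 1 <<< i == 0)
  · simp only [Bool.false_eq_true, if_false]
    exact (List.foldl_hom Array.toList (fun dp x => by
      cases hx : (x &&& 1 <<< i == 0)
      · simp only [Bool.false_eq_true, if_false]
        rw [Array.toList_setIfInBounds, arr_getD, arr_getD]
      · simp only [if_true])).symm
  · simp only [if_true]

theorem toList_aSos (orn n u : Nat) (dp : Array Nat) :
    (aSos orn n u dp).toList = (List.range n).foldl (aPassL orn u) dp.toList := by
  rw [aSos]
  exact (List.foldl_hom Array.toList (fun dp i => (toList_aPass orn u dp i).symm)).symm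

-- ---------- counting pass (dp = [0]*u; for x in nums: dp[x] += 1) ----------

theorem counts_fold (nums : List Int) (dp : List Nat)
    (h : ∀ x ∈ nums, x.toNat < dp.length) :
    (nums.foldl (fun dp x => dp.set x.toNat (dp.getD x.toNat 0 + 1)) dp).length = dp.length ∧
    ∀ v, v < dp.length →
      (nums.foldl (fun dp x => dp.set x.toNat (dp.getD x.toNat 0 + 1)) dp).getD v 0 =
        dp.getD v 0 + (nums.map Int.toNat).count v := by
  induction nums generalizing dp with
  | nil => simp
  | cons x t ih =>
      have hx : x.toNat < dp.length := h x (by simp)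
      have ht : ∀ z ∈ t, z.toNat < (dp.set x.toNat (dp.getD x.toNat 0 + 1)).length := by
        simpa using fun z hz => h z (by simp [hz])
      obtain ⟨hl, hv⟩ := ih (dp.set x.toNat (dp.getD x.toNat 0 + 1)) ht
      refine ⟨by simpa using hl, fun v hvlt => ?_⟩
      rw [List.foldl_cons, hv v (by simpa using hvlt),
        getD_set_eq_if dp x.toNat v _ hx]
      simp only [List.map_cons, List.count_cons]
      rcases eq_or_ne v x.toNat with rfl | hne
      · simp; omega
      · simp [hne, Ne.symm hne]
      
theorem counts_spec (nums : List Int) (u : Nat) (h : ∀ x ∈ nums, x.toNat < u) :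
    (aCountsL nums u).length = u ∧
    ∀ v, v < u → (aCountsL nums u).getD v 0 = (nums.map Int.toNat).count v := by
  have := counts_fold nums (List.replicate u 0) (by simpa using h)
  simpa [aCountsL] using this

-- ---------- the inner SOS pass ----------

theorem pass_fold (n j : Nat) (dp : List Nat) (hlen : dp.length = 2 ^ n) (hj : j < n) :
    ∀ k, k ≤ 2 ^ n →
      ((List.range k).foldl (fun dp x =>
          if x &&& 1 <<< j == 0 then dp
          else dp.set x (dp.getD x 0 + dp.getD (x ^^^ 1 <<< j) 0)) dp).length = 2 ^ n ∧
      ∀ v, v < 2 ^ n →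
        ((List.range k).foldl (fun dp x =>
            if x &&& 1 <<< j == 0 then dp
            else dp.set x (dp.getD x 0 + dp.getD (x ^^^ 1 <<< j) 0)) dp).getD v 0 =
          if v < k ∧ v.testBit j then dp.getD v 0 + dp.getD (v ^^^ 2 ^ j) 0 else dp.getD v 0 := by
  intro k
  induction k with
  | zero => simp [hlen]
  | succ k ih =>
      intro hk1
      obtain ⟨ihl, ihv⟩ := ih (by omega)
      rw [List.range_succ, List.foldl_append, List.foldl_cons, List.foldl_nil]
      set r := (List.range k).foldl (fun dp x =>
          if x &&& 1 <<< j == 0 then dp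
          else dp.set x (dp.getD x 0 + dp.getD (x ^^^ 1 <<< j) 0)) dp with hr
      have hklt : k < 2 ^ n := by omega
      cases hkb : k.testBit j
      · have hg : (k &&& 1 <<< j == 0) = true := by rw [and_two_pow_beq_zero, hkb]; rfl
        rw [hg]
        simp only [if_true]
        refine ⟨ihl, fun v hv => ?_⟩
        rw [ihv v hv]
        have hiff : (v < k ∧ v.testBit j = true) ↔ (v < k + 1 ∧ v.testBit j = true) := by
          constructor <;> rintro ⟨h1, h2⟩ <;> refine ⟨?_, h2⟩
          · omega
          · rcases eq_or_ne v k with rfl | hne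
            · rw [hkb] at h2; cases h2
            · omega
        split <;> split <;> simp_all
      · have hg : (k &&& 1 <<< j == 0) = false := by rw [and_two_pow_beq_zero, hkb]; rfl
        rw [hg]
        simp only [Bool.false_eq_true, if_false]
        have hxlt : k ^^^ 2 ^ j < 2 ^ n := xor_two_pow_lt k n j hklt hj
        have hxbit : (k ^^^ 2 ^ j).testBit j = false := by
          rw [Nat.testBit_xor, hkb, Nat.testBit_two_pow]
          simp
        have hrk : r.getD k 0 = dp.getD k 0 := by
          rw [ihv k hklt]; simp
        have hrx : r.getD (k ^^^ 1 <<< j) 0 = dp.getD (k ^^^ 2 ^ j) 0 := by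
          rw [Nat.one_shiftLeft, ihv (k ^^^ 2 ^ j) hxlt, hxbit]; simp
        refine ⟨by simpa using ihl, fun v hv => ?_⟩
        rw [getD_set_eq_if r k v _ (by omega), hrk, hrx]
        rcases eq_or_ne v k with rfl | hne
        · simp [hkb]
        · rw [if_neg hne, ihv v hv]
          have hiff : (v < k ∧ v.testBit j = true) ↔ (v < k + 1 ∧ v.testBit j = true) := by
            constructor <;> rintro ⟨h1, h2⟩ <;> exact ⟨by omega, h2⟩
          split <;> split <;> simp_all

theorem pass_spec_set (orn n j : Nat) (hj : j < n) (hbit : orn.testBit j = true)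
    (dp : List Nat) (hlen : dp.length = 2 ^ n) :
    (aPassL orn (2 ^ n) dp j).length = 2 ^ n ∧
    ∀ v, v < 2 ^ n → (aPassL orn (2 ^ n) dp j).getD v 0 =
      if v.testBit j then dp.getD v 0 + dp.getD (v ^^^ 2 ^ j) 0 else dp.getD v 0 := by
  obtain ⟨h1, h2⟩ := pass_fold n j dp hlen hj (2 ^ n) le_rfl
  have hg : (orn &&& 1 <<< j == 0) = false := by rw [and_two_pow_beq_zero, hbit]; rfl
  have ha : aPassL orn (2 ^ n) dp j = (List.range (2 ^ n)).foldl (fun dp x =>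
      if x &&& 1 <<< j == 0 then dp
      else dp.set x (dp.getD x 0 + dp.getD (x ^^^ 1 <<< j) 0)) dp := by
    unfold aPassL
    simp only [hg, Bool.false_eq_true, if_false]
  refine ⟨by rw [ha]; exact h1, fun v hv => ?_⟩
  rw [ha, h2 v hv]
  simp [hv]

theorem pass_spec_skip (orn u j : Nat) (hbit : orn.testBit j = false) (dp : List Nat) :
    aPassL orn u dp j = dp := by
  simp [aPassL, and_two_pow_beq_zero, hbit]

-- ---------- the predicate tracked through the SOS passes ----------

-- after the passes for bits i < j have run, dp[v] counts the y that are ⊆ v on the processed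
-- orn-bits and equal to v elsewhere (below n)
def cpB (orn n j v y : Nat) : Bool :=
  decide (∀ i < n, (y.testBit i = true → v.testBit i = true) ∧
    ((orn.testBit i = true ∧ i < j) ∨ y.testBit i = v.testBit i))

theorem or_eq_testBit_imp (a b i : Nat) (h : a ||| b = b) (ha : a.testBit i = true) :
    b.testBit i = true := by
  have h2 : (a ||| b).testBit i = b.testBit i := by rw [h]
  rw [Nat.testBit_or, ha] at h2
  simpa using h2.symm

theorem cp_zero (orn n v y : Nat) (hv : v < 2 ^ n) (hy : y < 2 ^ n) :
    cpB orn n 0 v y = (y == v) := by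
  have hiff : (∀ i < n, (y.testBit i = true → v.testBit i = true) ∧
      ((orn.testBit i = true ∧ i < 0) ∨ y.testBit i = v.testBit i)) ↔ y = v := by
    constructor
    · intro h
      apply Nat.eq_of_testBit_eq
      intro i
      by_cases hi : i < n
      · rcases (h i hi).2 with ⟨_, hlt⟩ | heq
        · omega
        · exact heq
      · rw [testBit_ge_false y n i hy (by omega), testBit_ge_false v n i hv (by omega)]
    · rintro rfl i hi
      exact ⟨fun h => h, Or.inr rfl⟩
  rw [cpB, Bool.eq_iff_iff]
  simp only [decide_eq_true_eq, beq_iff_eq]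
  exact hiff

theorem cp_skip (orn n j v y : Nat) (hbit : orn.testBit j = false) :
    cpB orn n (j + 1) v y = cpB orn n j v y := by
  rw [cpB, cpB, decide_eq_decide]
  constructor <;> intro h i hi <;> obtain ⟨h1, h2⟩ := h i hi <;> refine ⟨h1, ?_⟩
  · rcases h2 with ⟨ho, hlt⟩ | heq
    · rcases eq_or_ne i j with rfl | hne
      · rw [hbit] at ho; cases ho
      · exact Or.inl ⟨ho, by omega⟩
    · exact Or.inr heq
  · rcases h2 with ⟨ho, hlt⟩ | heq
    · exact Or.inl ⟨ho, by omega⟩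
    · exact Or.inr heq

theorem cp_step_vfalse (orn n j v y : Nat) (hbit : orn.testBit j = true)
    (hv : v.testBit j = false) :
    cpB orn n (j + 1) v y = cpB orn n j v y := by
  rw [cpB, cpB, decide_eq_decide]
  constructor <;> intro h i hi <;> obtain ⟨h1, h2⟩ := h i hi <;> refine ⟨h1, ?_⟩
  · rcases eq_or_ne i j with rfl | hne
    · right
      cases hyb : y.testBit i
      · rw [hv]
      · rw [h1 hyb]
    · rcases h2 with ⟨ho, hlt⟩ | heq
      · exact Or.inl ⟨ho, by omega⟩
      · exact Or.inr heq
  · rcases eq_or_ne i j with rfl | hne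
    · exact Or.inl ⟨hbit, by omega⟩
    · rcases h2 with ⟨ho, hlt⟩ | heq
      · exact Or.inl ⟨ho, by omega⟩
      · exact Or.inr heq

theorem cp_step_ytrue (orn n j v y : Nat) (hj : j < n) (hbit : orn.testBit j = true)
    (hv : v.testBit j = true) :
    (cpB orn n (j + 1) v y && y.testBit j) = cpB orn n j v y := by
  cases hy : y.testBit j
  · simp only [Bool.and_false]
    symm
    rw [cpB, decide_eq_false_iff_not]
    intro h
    rcases (h j hj).2 with ⟨_, hlt⟩ | heq
    · omega
    · rw [hy, hv] at heq; cases heq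
  · simp only [Bool.and_true]
    rw [cpB, cpB, decide_eq_decide]
    constructor <;> intro h i hi <;> obtain ⟨h1, h2⟩ := h i hi <;> refine ⟨h1, ?_⟩
    · rcases eq_or_ne i j with rfl | hne
      · exact Or.inr (by rw [hy, hv])
      · rcases h2 with ⟨ho, hlt⟩ | heq
        · exact Or.inl ⟨ho, by omega⟩
        · exact Or.inr heq
    · rcases eq_or_ne i j with rfl | hne
      · exact Or.inl ⟨hbit, by omega⟩
      · rcases h2 with ⟨ho, hlt⟩ | heq
        · exact Or.inl ⟨ho, by omega⟩
        · exact Or.inr heq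

theorem cp_step_yfalse (orn n j v y : Nat) (hj : j < n) (hbit : orn.testBit j = true)
    (hv : v.testBit j = true) :
    (cpB orn n (j + 1) v y && !y.testBit j) = cpB orn n j (v ^^^ 2 ^ j) y := by
  have hw : ∀ i, (v ^^^ 2 ^ j).testBit i = if i = j then !v.testBit i else v.testBit i := by
    intro i
    rw [Nat.testBit_xor, Nat.testBit_two_pow]
    rcases eq_or_ne i j with rfl | hne
    · simp
    · simp [hne, Ne.symm hne]
  cases hy : y.testBit j
  · simp only [Bool.not_false, Bool.and_true]
    rw [cpB, cpB, decide_eq_decide]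
    constructor <;> intro h i hi <;> obtain ⟨h1, h2⟩ := h i hi
    · rcases eq_or_ne i j with rfl | hne
      · refine ⟨fun hyb => ?_, Or.inr ?_⟩
        · rw [hy] at hyb; cases hyb
        · rw [hy, hw, if_pos rfl, hv]; rfl
      · refine ⟨fun hyb => ?_, ?_⟩
        · rw [hw, if_neg hne]; exact h1 hyb
        · rw [hw, if_neg hne]
          rcases h2 with ⟨ho, hlt⟩ | heq
          · exact Or.inl ⟨ho, by omega⟩
          · exact Or.inr heq
    · rcases eq_or_ne i j with rfl | hne
      · exact ⟨fun hyb => (by rw [hy] at hyb; cases hyb), Or.inl ⟨hbit, by omega⟩⟩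
      · rw [hw, if_neg hne] at h1 h2
        refine ⟨h1, ?_⟩
        rcases h2 with ⟨ho, hlt⟩ | heq
        · exact Or.inl ⟨ho, by omega⟩
        · exact Or.inr heq
  · simp only [Bool.not_true, Bool.and_false]
    symm
    rw [cpB, decide_eq_false_iff_not]
    intro h
    have := (h j hj).1 hy
    rw [hw, if_pos rfl, hv] at this
    cases this

theorem cp_final (orn n sub y : Nat) (horn : orn < 2 ^ n)
    (hsub : sub ||| orn = orn) (hy : y ||| orn = orn) :
    cpB orn n n sub y = (y ||| sub == sub) := by
  have hylt : y < 2 ^ n := lt_of_le_of_lt (hy ▸ Nat.left_le_or) horn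
  have hiff : (∀ i < n, (y.testBit i = true → sub.testBit i = true) ∧
      ((orn.testBit i = true ∧ i < n) ∨ y.testBit i = sub.testBit i)) ↔ y ||| sub = sub := by
    constructor
    · intro h
      apply Nat.eq_of_testBit_eq
      intro i
      rw [Nat.testBit_or]
      by_cases hi : i < n
      · cases hyb : y.testBit i
        · simp
        · rw [(h i hi).1 hyb]; simp
      · rw [testBit_ge_false y n i hylt (by omega)]; simp
    · intro h i hi
      refine ⟨fun hyb => or_eq_testBit_imp y sub i h hyb, ?_⟩
      by_cases ho : orn.testBit i = true
      · exact Or.inl ⟨ho, hi⟩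
      · right
        cases hyb : y.testBit i
        · cases hsb : sub.testBit i
          · rfl
          · rw [or_eq_testBit_imp sub orn i hsub hsb] at ho; cases ho rfl
        · rw [or_eq_testBit_imp y orn i hy hyb] at ho; cases ho rfl
  rw [cpB, Bool.eq_iff_iff]
  simp only [decide_eq_true_eq, beq_iff_eq]
  exact hiff

-- ---------- the SOS loop ----------

theorem sos_spec (orn n : Nat) (ys : List Nat)
    (hys : ∀ y ∈ ys, y < 2 ^ n)
    (dp1 : List Nat) (hlen : dp1.length = 2 ^ n)
    (hbase : ∀ v, v < 2 ^ n → dp1.getD v 0 = ys.count v) :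
    ∀ j, j ≤ n →
      ((List.range j).foldl (aPassL orn (2 ^ n)) dp1).length = 2 ^ n ∧
      ∀ v, v < 2 ^ n → ((List.range j).foldl (aPassL orn (2 ^ n)) dp1).getD v 0 =
        ys.countP (fun y => cpB orn n j v y) := by
  intro j
  induction j with
  | zero =>
      intro _
      refine ⟨by simpa using hlen, fun v hv => ?_⟩
      simp only [List.range_zero, List.foldl_nil]
      rw [hbase v hv, List.count_eq_countP]
      exact List.countP_congr fun y hyy => by rw [cp_zero orn n v y hv (hys y hyy)]
  | succ j ihj =>
      intro hj1
      obtain ⟨ihl, ihv⟩ := ihj (by omega)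
      rw [List.range_succ, List.foldl_append, List.foldl_cons, List.foldl_nil]
      set r := (List.range j).foldl (aPassL orn (2 ^ n)) dp1 with hrdef
      cases hb : orn.testBit j
      · rw [pass_spec_skip orn (2 ^ n) j hb r]
        refine ⟨ihl, fun v hv => ?_⟩
        rw [ihv v hv]
        exact List.countP_congr fun y hyy => by rw [cp_skip orn n j v y hb]
      · obtain ⟨pl, pv⟩ := pass_spec_set orn n j (by omega) hb r ihl
        refine ⟨pl, fun v hv => ?_⟩
        rw [pv v hv]
        cases hvb : v.testBit j
        · simp only [Bool.false_eq_true, if_false]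
          rw [ihv v hv]
          exact List.countP_congr fun y hyy => by rw [cp_step_vfalse orn n j v y hb hvb]
        · simp only [if_true]
          rw [ihv v hv, ihv (v ^^^ 2 ^ j) (xor_two_pow_lt v n j hv (by omega))]
          rw [countP_split ys (fun y => cpB orn n (j + 1) v y) (fun y => y.testBit j)]
          congr 1
          · exact List.countP_congr fun y hyy => by
              rw [cp_step_ytrue orn n j v y (by omega) hb hvb]
          · exact List.countP_congr fun y hyy => by
              rw [cp_step_yfalse orn n j v y (by omega) hb hvb]

-- ---------- the OR fold ----------

theorem foldl_or_testBit (ys : List Nat) (a i : Nat) :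
    ((ys.foldl (· ||| ·) a).testBit i) = (a.testBit i || ys.any (fun y => y.testBit i)) := by
  induction ys generalizing a with
  | nil => simp
  | cons y t ih => simp [ih, Nat.testBit_or, Bool.or_assoc]

theorem mem_or_foldl (ys : List Nat) (y : Nat) (hy : y ∈ ys) :
    y ||| ys.foldl (· ||| ·) 0 = ys.foldl (· ||| ·) 0 := by
  apply Nat.eq_of_testBit_eq
  intro i
  rw [Nat.testBit_or, foldl_or_testBit]
  cases hb : y.testBit i
  · simp
  · have h2 : ys.any (fun y => y.testBit i) = true := List.any_eq_true.2 ⟨y, hy, hb⟩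
    simp [h2]

theorem foldl_bor_natCast (nums : List Int) (h : ∀ x ∈ nums, 0 ≤ x) (a : Nat) :
    nums.foldl (fun a b => PySem.Int.bor a b) (a : Int) =
      (((nums.map Int.toNat).foldl (· ||| ·) a : Nat) : Int) := by
  induction nums generalizing a with
  | nil => simp
  | cons x t ih =>
      have hx : ((x.toNat : Nat) : Int) = x := Int.toNat_of_nonneg (h x (by simp))
      simp only [List.foldl_cons, List.map_cons]
      rw [← hx, PySem.Int.bor_natCast, ih (fun z hz => h z (by simp [hz]))]
      simp only [Int.toNat_natCast]

-- ---------- B's scan count ----------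

theorem bCount_fold (nums : List Int) (h : ∀ x ∈ nums, 0 ≤ x) (sub : Nat) (acc : Nat) :
    nums.foldl (fun c x => if PySem.Int.bor x (sub : Int) == (sub : Int) then c + 1 else c) acc =
      acc + (nums.map Int.toNat).countP (fun y => y ||| sub == sub) := by
  induction nums generalizing acc with
  | nil => simp
  | cons x t ih =>
      have hx : ((x.toNat : Nat) : Int) = x := Int.toNat_of_nonneg (h x (by simp))
      simp only [List.foldl_cons, List.map_cons, List.countP_cons]
      rw [ih (fun z hz => h z (by simp [hz]))]
      have hcond : (PySem.Int.bor x (sub : Int) == (sub : Int)) = (x.toNat ||| sub == sub) := by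
        conv_lhs => rw [← hx]
        rw [PySem.Int.bor_natCast]
        simp
      rw [hcond]
      cases hb : (x.toNat ||| sub == sub)
      · simp
      · simp
        omega

theorem bCount_eq (nums : List Int) (h : ∀ x ∈ nums, 0 ≤ x) (sub : Nat) :
    bCount nums sub = (nums.map Int.toNat).countP (fun y => y ||| sub == sub) := by
  simpa [bCount] using bCount_fold nums h sub 0

-- ---------- the two submask walks agree ----------

theorem loop_eq (nums : List Int) (orn : Nat) (dp : Array Nat)
    (hdp : ∀ sub, sub ||| orn = orn → dp.getD sub 0 = bCount nums sub) :
    ∀ sub, sub ||| orn = orn → ∀ ans, aLoop orn dp sub ans = bLoop nums orn sub ans := by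
  intro sub
  induction sub using Nat.strong_induction_on with
  | _ sub ih =>
    intro hsub ans
    rw [aLoop, bLoop, hdp sub hsub]
    have hans : ∀ a : Int, PySem.Int.mod (a +
        (if (PySem.Int.bitCount ((orn ^^^ sub : Nat) : Int) % 2 == 0) then (1 : Int) else -1) *
          PySem.Int.powMod 2 (bCount nums sub) 1000000007) 1000000007 =
        if (PySem.Int.bitCount ((orn ^^^ sub : Nat) : Int) % 2 == 0)
        then PySem.Int.mod (a + PySem.Int.powMod 2 (bCount nums sub) 1000000007) 1000000007
        else PySem.Int.mod (a - PySem.Int.powMod 2 (bCount nums sub) 1000000007) 1000000007 := by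
      intro a
      cases (PySem.Int.bitCount ((orn ^^^ sub : Nat) : Int) % 2 == 0)
      · rw [if_neg (by simp), if_neg (by simp)]
        ring_nf
      · rw [if_pos rfl, if_pos rfl]
        ring_nf
    rw [hans]
    rcases eq_or_ne sub 0 with rfl | hne
    · rw [dif_pos rfl, dif_pos rfl]
    · rw [dif_neg hne, dif_neg hne]
      have hlt : (sub - 1) &&& orn < sub := Nat.lt_of_le_of_lt Nat.and_le_left (by omega)
      have hsub2 : ((sub - 1) &&& orn) ||| orn = orn := by
        apply Nat.eq_of_testBit_eq
        intro i
        rw [Nat.testBit_or, Nat.testBit_and]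
        cases orn.testBit i <;> simp
      exact ih _ hlt hsub2 _

-- ---------- main theorem ----------

theorem countEffective_spec : Claim_equal_countEffective := by
  unfold Claim_equal_countEffective Spec_countEffective
  intro nums _ hpre
  unfold countEffective countEffective_alt
  by_cases hall : nums.all (fun x => x == nums.headD 0)
  · rw [if_pos hall, if_pos hall]
  · rw [if_neg hall, if_neg hall]
    have hnenil : nums ≠ [] := by rintro rfl; simp at hall
    have h0 : ∀ x ∈ nums, 0 ≤ x := by
      rcases hpre with h | h
      · exact h
      · exfalso
        apply hall
        rw [List.all_eq_true]
        intro x hx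
        simpa using h x hx
    have hornB : nums.foldl (fun a b => PySem.Int.bor a b) 0 =
        (((nums.map Int.toNat).foldl (· ||| ·) 0 : Nat) : Int) := by
      simpa using foldl_bor_natCast nums h0 0
    have hornA : nums.tail.foldl (fun a b => PySem.Int.bor a b) (nums.headD 0) =
        (((nums.map Int.toNat).foldl (· ||| ·) 0 : Nat) : Int) := by
      obtain ⟨hd, t, rfl⟩ := List.exists_cons_of_ne_nil hnenil
      have hhd : ((hd.toNat : Nat) : Int) = hd := Int.toNat_of_nonneg (h0 hd (by simp))
      have h0t : ∀ x ∈ t, 0 ≤ x := fun z hz => h0 z (by simp [hz])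
      simp only [List.tail_cons, List.headD_cons, List.map_cons, List.foldl_cons,
        Nat.zero_or]
      rw [← hhd, foldl_bor_natCast t h0t hd.toNat, Int.toNat_natCast]
    set ys := nums.map Int.toNat with hysdef
    set N := ys.foldl (· ||| ·) 0 with hNdef
    set n := PySem.Int.bitLength (N : Int) with hndef
    have horn : N < 2 ^ n := by
      have := PySem.Int.lt_two_pow_bitLength (N : Int)
      simpa using this
    have hsubm : ∀ y ∈ ys, y ||| N = N := fun y hy => mem_or_foldl ys y hy
    have hylt : ∀ y ∈ ys, y < 2 ^ n := fun y hy =>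
      lt_of_le_of_lt (le_of_le_of_eq Nat.left_le_or (hsubm y hy)) horn
    have hxlt : ∀ x ∈ nums, x.toNat < 2 ^ n := fun x hx => hylt x.toNat (by
      rw [hysdef]; exact List.mem_map_of_mem hx)
    obtain ⟨hcl, hcv⟩ := counts_spec nums (2 ^ n) hxlt
    obtain ⟨hsl, hsv⟩ := sos_spec N n ys hylt (aCountsL nums (2 ^ n)) hcl hcv n le_rfl
    have hdp : ∀ sub, sub ||| N = N →
        (aSos N n (2 ^ n) (aCounts nums (2 ^ n))).getD sub 0 = bCount nums sub := by
      intro sub hsub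
      have hsublt : sub < 2 ^ n :=
        lt_of_le_of_lt (le_of_le_of_eq Nat.left_le_or hsub) horn
      rw [arr_getD, toList_aSos, toList_aCounts, hsv sub hsublt, bCount_eq nums h0 sub]
      exact List.countP_congr fun y hyy => by
        rw [cp_final N n sub y horn hsub (hsubm y hyy)]
    have hloop := loop_eq nums N (aSos N n (2 ^ n) (aCounts nums (2 ^ n))) hdp N
      (by rw [Nat.or_self]) 0
    rw [hornA, hornB]
    simp only [Int.toNat_natCast, ← hndef, Nat.one_shiftLeft]
    rw [hloop]
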